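-- pv_equiv track=rewrite | github.com/firstone01157/cis-k8s-hardening | harden_manifests.py | _is_valid_yaml_basic
-- ===== SOURCE A (Python) =====
-- from typing import List, Tuple, Optional
--
-- def _is_valid_yaml_basic(lines: List[str]) -> bool:
--     """
--     Basic YAML syntax validation (checks for obvious issues).
--
--     Args:
--         lines: List of lines from YAML file.
--
--     Returns:
--         True if looks valid, False otherwise.
--     """
--     # Check for unclosed quotes
--     in_double = False
--     in_single = False
--
--     for line in lines:
--         stripped = line.strip()
--         if stripped.startswith('#'):
--             continue
--
--         for char in stripped:
--             if char == '"' and not in_single: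
--                 in_double = not in_double
--             elif char == "'" and not in_double:
--                 in_single = not in_single
--
--     # Both should be closed at end
--     if in_double or in_single:
--         return False
--
--     return True
-- ===== SOURCE B (Python) =====
-- from typing import List
--
-- def _is_valid_yaml_basic(lines: List[str]) -> bool:
--     content = ''.join(l.strip() for l in lines if not l.strip().startswith('#'))
--     i, n = 0, len(content)
--     while True:
--         while i < n and content[i] not in '"\'':
--             i += 1
--         if i >= n:
--             return True
--         q = content[i]
--         j = content.find(q, i + 1)
--         if j == -1:
--             return False
--         i = j + 1
-- ===== Notes on version B (the rewrite author's own statement) =====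
-- stated objective: alternative
-- what changed: B joins the stripped non-comment lines into one string and scans it by jumping from each opening quote directly to its matching close with str.find, instead of A's per-character two-boolean toggle state machine threaded across lines.
import Mathlib
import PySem

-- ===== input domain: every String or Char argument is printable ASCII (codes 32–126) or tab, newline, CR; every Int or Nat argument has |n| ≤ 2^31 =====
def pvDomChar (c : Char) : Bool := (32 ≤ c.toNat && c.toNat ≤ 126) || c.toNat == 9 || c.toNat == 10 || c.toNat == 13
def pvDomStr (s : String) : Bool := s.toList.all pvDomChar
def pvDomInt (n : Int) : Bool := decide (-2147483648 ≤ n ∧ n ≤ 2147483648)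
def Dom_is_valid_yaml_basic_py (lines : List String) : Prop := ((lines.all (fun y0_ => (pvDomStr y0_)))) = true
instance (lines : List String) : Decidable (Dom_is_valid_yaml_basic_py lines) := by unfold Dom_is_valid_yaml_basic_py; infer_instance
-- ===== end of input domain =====

-- B replaces A's per-character two-boolean quote state machine by a scan that jumps
-- from each opening quote to its matching closing quote (alternative decomposition, same cost).

-- ===== PORT A =====
-- state = (in_double, in_single); one step per character of a stripped line
def pvStepA (st : Bool × Bool) (c : Char) : Bool × Bool :=
  if c = '"' && !st.2 then (!st.1, st.2)
  else if c = '\'' && !st.1 then (st.1, !st.2)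
  else st

def is_valid_yaml_basic_py (lines : List String) : Bool :=
  let st := lines.foldl (fun st line =>
    let stripped := PySem.Str.strip line
    if PySem.Str.startswith stripped "#" then st
    else stripped.toList.foldl pvStepA st) (false, false)
  !(st.1 || st.2)

-- ===== PORT B =====
-- content.find(q, i+1): drop everything up to and including the first occurrence of q
def pvFindAfter (q : Char) : List Char → Option (List Char)
  | [] => none
  | c :: rest => if c = q then some rest else pvFindAfter q rest

theorem pvFindAfter_length {q : Char} : ∀ {xs r : List Char},
    pvFindAfter q xs = some r → r.length < xs.length := by
  intro xs
  induction xs with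
  | nil => intro r hr; simp [pvFindAfter] at hr
  | cons c rest ih =>
    intro r h
    by_cases hc : c = q
    · simp [pvFindAfter, hc] at h; subst h; simp
    · simp [pvFindAfter, hc] at h
      exact Nat.lt_trans (ih h) (by simp)

def pvScanB : List Char → Bool
  | [] => true
  | c :: rest =>
    if c = '"' || c = '\'' then
      match h : pvFindAfter c rest with
      | some rest' => pvScanB rest'
      | none => false
    else pvScanB rest
termination_by xs => xs.length
decreasing_by
  · exact Nat.lt_trans (pvFindAfter_length h) (by simp)
  · simp

def is_valid_yaml_basic_py_alt (lines : List String) : Bool :=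
  let content := ((lines.filter
      (fun l => !(PySem.Str.startswith (PySem.Str.strip l) "#"))).map
      (fun l => (PySem.Str.strip l).toList)).flatten
  pvScanB content

-- ===== PRECONDITION & SPEC =====
def Spec_is_valid_yaml_basic_py (lines : List String) (out : Bool) : Prop := out = is_valid_yaml_basic_py_alt lines
instance (lines : List String) (out : Bool) : Decidable (Spec_is_valid_yaml_basic_py lines out) := by unfold Spec_is_valid_yaml_basic_py; infer_instance

-- ===== CLAIM (what is proved, stated in full; the proofs are below) =====
def Claim_equal_is_valid_yaml_basic_py : Prop := ∀ (lines : List String), Dom_is_valid_yaml_basic_py lines → Spec_is_valid_yaml_basic_py lines (is_valid_yaml_basic_py lines)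

-- ===== LEMMAS AND PROOFS =====

-- A's fold over lines is the char machine run over the concatenation of the kept stripped lines
theorem foldA_flatten : ∀ (lines : List String) (st : Bool × Bool),
    lines.foldl (fun st line =>
      let stripped := PySem.Str.strip line
      if PySem.Str.startswith stripped "#" then st
      else stripped.toList.foldl pvStepA st) st
    = (((lines.filter
        (fun l => !(PySem.Str.startswith (PySem.Str.strip l) "#"))).map
        (fun l => (PySem.Str.strip l).toList)).flatten).foldl pvStepA st := by
  intro lines
  induction lines with
  | nil => intro st; simp
  | cons l rest ih =>
    intro st
    by_cases h : PySem.Str.startswith (PySem.Str.strip l) "#" = true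
    · simp at h
      simpa [h] using ih st
    · simp at h
      simpa [h, List.foldl_append] using
        ih (List.foldl pvStepA st (PySem.Str.strip l).toList)

-- while in a double quote, only '"' matters: run to the matching close
theorem machine_inDouble : ∀ (xs : List Char),
    xs.foldl pvStepA (true, false)
    = match pvFindAfter '"' xs with
      | some r => r.foldl pvStepA (false, false)
      | none => (true, false) := by
  intro xs
  induction xs with
  | nil => simp [pvFindAfter]
  | cons c rest ih =>
    by_cases hc : c = '"'
    · simp [pvFindAfter, hc, pvStepA]
    · simp [pvFindAfter, hc, pvStepA, ih]

-- while in a single quote, only '\'' matters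
theorem machine_inSingle : ∀ (xs : List Char),
    xs.foldl pvStepA (false, true)
    = match pvFindAfter '\'' xs with
      | some r => r.foldl pvStepA (false, false)
      | none => (false, true) := by
  intro xs
  induction xs with
  | nil => simp [pvFindAfter]
  | cons c rest ih =>
    by_cases hc : c = '\''
    · have hc2 : c ≠ '"' := by subst hc; decide
      simp [pvFindAfter, hc, pvStepA]
    · by_cases hc2 : c = '"'
      · simp [pvFindAfter, hc, hc2, pvStepA, ih]
      · simp [pvFindAfter, hc, hc2, pvStepA, ih]

-- unfold one step of pvScanB at a quote character
theorem pvScanB_quote (c : Char) (rest : List Char) (hc : (c = '"' || c = '\'') = true) :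
    pvScanB (c :: rest) = match pvFindAfter c rest with
      | some r => pvScanB r
      | none => false := by
  rw [pvScanB, if_pos hc]
  split
  · next r heq => rw [heq]
  · next heq => rw [heq]

-- B's jump scan computes whether the machine ends fully closed
theorem scanB_eq_machine : ∀ (n : ℕ) (xs : List Char), xs.length ≤ n →
    pvScanB xs = !((xs.foldl pvStepA (false, false)).1 || (xs.foldl pvStepA (false, false)).2) := by
  intro n
  induction n with
  | zero =>
    intro xs hx
    have : xs = [] := List.eq_nil_of_length_eq_zero (Nat.le_zero.mp hx)
    subst this; simp [pvScanB]
  | succ n ih =>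
    intro xs hx
    cases xs with
    | nil => simp [pvScanB]
    | cons c rest =>
      have hlen : rest.length ≤ n := by simpa using hx
      by_cases hd : c = '"'
      · subst hd
        have hstep : pvStepA (false, false) '"' = (true, false) := by decide
        cases hf : pvFindAfter '"' rest with
        | some r =>
          have hr : r.length ≤ n := Nat.le_of_lt (Nat.lt_of_lt_of_le (pvFindAfter_length hf) hlen)
          rw [pvScanB_quote _ _ (by decide), List.foldl_cons, hstep, machine_inDouble, hf]
          simpa using ih r hr
        | none =>
          rw [pvScanB_quote _ _ (by decide), List.foldl_cons, hstep, machine_inDouble, hf]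
          simp
      · by_cases hs : c = '\''
        · subst hs
          have hstep : pvStepA (false, false) '\'' = (false, true) := by decide
          cases hf : pvFindAfter '\'' rest with
          | some r =>
            have hr : r.length ≤ n := Nat.le_of_lt (Nat.lt_of_lt_of_le (pvFindAfter_length hf) hlen)
            rw [pvScanB_quote _ _ (by decide), List.foldl_cons, hstep, machine_inSingle, hf]
            simpa using ih r hr
          | none =>
            rw [pvScanB_quote _ _ (by decide), List.foldl_cons, hstep, machine_inSingle, hf]
            simp
        · rw [pvScanB]
          have hstep : pvStepA (false, false) c = (false, false) := by
            simp [pvStepA, hd, hs]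
          simp only [hd, hs, List.foldl_cons, hstep]
          simpa [hd, hs, Bool.not_or] using ih rest hlen

-- ===== VERDICT (by name: the statement is the Claim_ definition above) =====
theorem is_valid_yaml_basic_py_spec : Claim_equal_is_valid_yaml_basic_py := by
  intro lines _
  unfold Spec_is_valid_yaml_basic_py is_valid_yaml_basic_py is_valid_yaml_basic_py_alt
  rw [foldA_flatten]
  exact (scanB_eq_machine _ _ (Nat.le_refl _)).symm
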